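-- pv_equiv track=rewrite | github.com/TheFenrisLycaon/DSA-C-- | companies/Increff/satck.py | stackDisplay
-- ===== SOURCE A (Python) =====
-- def stackDisplay(N, arr):
--     stack = []
--     ret = []
--     for c in arr:
--         if c == 0:
--             try:
--                 stack = stack[:-1]
--             except:
--                 ret.append(0)
--                 continue
--         else:
--             stack.append(c)
--
--         ret.append(sum([i * j**2 for i in stack for j in stack]))
--
--     return ret
-- ===== SOURCE B (Python) =====
-- def stackDisplay(N, arr):
--     # O(len(arr)): maintain running sum s and sum of squares q; each recorded
--     # value sum(i*j**2 for i,j in stack^2) equals s*q.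
--     stack = []
--     s = 0
--     q = 0
--     ret = []
--     for c in arr:
--         if c == 0:
--             if stack:
--                 x = stack.pop()
--                 s -= x
--                 q -= x * x
--         else:
--             stack.append(c)
--             s += c
--             q += c * c
--         ret.append(s * q)
--     return ret
-- ===== Notes on version B (the rewrite author's own statement) =====
-- stated objective: faster
-- what changed: Replaces the per-step quadratic double sum over the whole stack (cubic overall) with incrementally maintained running sum S and sum-of-squares Q, appending S*Q each step.
import Mathlib
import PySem

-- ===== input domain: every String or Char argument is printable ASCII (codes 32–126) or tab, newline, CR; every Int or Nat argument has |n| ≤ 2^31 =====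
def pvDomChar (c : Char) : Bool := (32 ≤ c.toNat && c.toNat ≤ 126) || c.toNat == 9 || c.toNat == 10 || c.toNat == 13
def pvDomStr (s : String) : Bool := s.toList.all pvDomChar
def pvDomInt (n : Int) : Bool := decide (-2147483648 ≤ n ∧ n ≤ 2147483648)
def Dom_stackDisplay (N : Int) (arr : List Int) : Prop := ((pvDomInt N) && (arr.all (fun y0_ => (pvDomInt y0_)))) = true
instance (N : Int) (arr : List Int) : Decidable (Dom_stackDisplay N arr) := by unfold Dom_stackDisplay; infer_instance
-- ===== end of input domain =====

-- B maintains a running sum S and sum-of-squares Q and records S*Q each step (O(n)),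
-- instead of A's full double sum over the stack at every step.


-- ===== PORT A =====
-- one iteration of A's loop: pop via slice stack[:-1] or push, then append the double sum
def stepA (st_ret : List Int × List Int) (c : Int) : List Int × List Int :=
  let st := if c == 0 then PySem.List.slice st_ret.1 none (some (-1)) else st_ret.1 ++ [c]
  (st, st_ret.2 ++ [(st.flatMap (fun i => st.map (fun j => i * j ^ 2))).sum])

def stackDisplay (N : Int) (arr : List Int) : List Int :=
  (arr.foldl stepA ([], [])).2

-- ===== PORT B =====
-- one iteration of B's loop over state (stack, s, q, ret)
def stepB (st : List Int × Int × Int × List Int) (c : Int) : List Int × Int × Int × List Int :=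
  let (stack, s, q, ret) := st
  let (stack', s', q') :=
    if c == 0 then
      match stack.getLast? with
      | none => (stack, s, q)
      | some x => (stack.dropLast, s - x, q - x * x)
    else (stack ++ [c], s + c, q + c * c)
  (stack', s', q', ret ++ [s' * q'])

def stackDisplay_alt (N : Int) (arr : List Int) : List Int :=
  (arr.foldl stepB ([], 0, 0, [])).2.2.2

-- ===== PRECONDITION & SPEC =====
def Spec_stackDisplay (N : Int) (arr : List Int) (out : List Int) : Prop := out = stackDisplay_alt N arr
instance (N : Int) (arr : List Int) (out : List Int) : Decidable (Spec_stackDisplay N arr out) := by unfold Spec_stackDisplay; infer_instance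

-- ===== CLAIM (what is proved, stated in full; the proofs are below) =====
def Claim_equal_stackDisplay : Prop := ∀ (N : Int) (arr : List Int), Dom_stackDisplay N arr → Spec_stackDisplay N arr (stackDisplay N arr)

-- ===== LEMMAS AND PROOFS =====

-- sum of squares of a stack (proof-side abbreviation)
def sqsum (st : List Int) : Int := (st.map (fun x => x * x)).sum

theorem sum_map_pow (i : Int) (t : List Int) :
    (t.map (fun j => i * j ^ 2)).sum = i * sqsum t := by
  induction t with
  | nil => simp [sqsum]
  | cons b u ih =>
    simp only [List.map_cons, List.sum_cons, sqsum] at *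
    rw [ih]; ring

theorem sum_map_mul_const (t : List Int) (c : Int) :
    (t.map (fun i => i * c)).sum = t.sum * c := by
  induction t with
  | nil => simp
  | cons b u ih => simp only [List.map_cons, List.sum_cons, ih]; ring

-- A's double sum factors as (Σ i) * (Σ j²)
theorem sum_flatMap' (l : List Int) (f : Int → List Int) :
    (l.flatMap f).sum = (l.map (fun x => (f x).sum)).sum := by
  induction l with
  | nil => rfl
  | cons b u ih => simp [ih]

theorem pairSum_eq (st : List Int) :
    (st.flatMap (fun i => st.map (fun j => i * j ^ 2))).sum = st.sum * sqsum st := by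
  rw [sum_flatMap']
  calc (st.map (fun i => ((st.map fun j => i * j ^ 2)).sum)).sum
      = (st.map (fun i => i * sqsum st)).sum := by
        congr 1; exact List.map_congr_left (fun i _ => sum_map_pow i st)
    _ = st.sum * sqsum st := sum_map_mul_const st (sqsum st)

theorem stepA_push (st ret : List Int) (c : Int) (hc : ¬ c = 0) :
    stepA (st, ret) c = (st ++ [c], ret ++ [(st ++ [c]).sum * sqsum (st ++ [c])]) := by
  have h : (c == 0) = false := by simp [hc]
  simp only [stepA, h, Bool.false_eq_true, if_false]
  rw [pairSum_eq]

theorem stepA_pop (st ret : List Int) :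
    stepA (st, ret) 0 = (st.dropLast, ret ++ [st.dropLast.sum * sqsum st.dropLast]) := by
  simp only [stepA, beq_self_eq_true, if_true, PySem.List.slice_to_neg_one]
  rw [pairSum_eq]

-- invariant-carrying loop equivalence
theorem loop_eq (arr : List Int) : ∀ (st ret : List Int),
    (arr.foldl stepA (st, ret)).2 = (arr.foldl stepB (st, st.sum, sqsum st, ret)).2.2.2 := by
  induction arr with
  | nil => intro st ret; rfl
  | cons c t ih =>
    intro st ret
    simp only [List.foldl_cons]
    by_cases hc : c = 0
    · subst hc
      rw [stepA_pop]
      rcases List.eq_nil_or_concat st with rfl | ⟨l, x, rfl⟩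
      · simpa [stepB, sqsum] using ih [] (ret ++ [0])
      · simp only [List.concat_eq_append]
        have hd : (l ++ [x]).dropLast = l := by simp
        rw [hd]
        have hB : stepB (l ++ [x], (l ++ [x]).sum, sqsum (l ++ [x]), ret) 0
            = (l, l.sum, sqsum l, ret ++ [l.sum * sqsum l]) := by
          have hg : (l ++ [x]).getLast? = some x := by simp
          have h1 : (l ++ [x]).sum - x = l.sum := by simp
          have h2 : sqsum (l ++ [x]) - x * x = sqsum l := by simp [sqsum]
          simp only [stepB, beq_self_eq_true, if_true, hg, hd]
          rw [h1, h2]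
        rw [hB, ih]
    · rw [stepA_push st ret c hc]
      have hB : stepB (st, st.sum, sqsum st, ret) c
          = (st ++ [c], (st ++ [c]).sum, sqsum (st ++ [c]), ret
              ++ [(st ++ [c]).sum * sqsum (st ++ [c])]) := by
        have h : (c == 0) = false := by simp [hc]
        simp only [stepB, h, Bool.false_eq_true, if_false]
        rw [show st.sum + c = (st ++ [c]).sum from by simp,
            show sqsum st + c * c = sqsum (st ++ [c]) from by simp [sqsum]]
      rw [hB, ih]

-- ===== VERDICT (by name: the statement is the Claim_ definition above) =====
theorem stackDisplay_spec : Claim_equal_stackDisplay := by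
  intro N arr _
  unfold Spec_stackDisplay stackDisplay stackDisplay_alt
  have := loop_eq arr [] []
  simpa [sqsum] using this
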